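-- pv_equiv track=rewrite | github.com/dseymo02/test_rep | question2.py | search
-- ===== SOURCE A (Python) =====
-- def search(str,lst,size):
-- 	pos = 0
-- 	result = -1
-- 	for s in lst:
-- 		if s == str:
-- 			result = pos
-- 		else:
-- 			pos += 1
-- 	return result
-- ===== SOURCE B (Python) =====
-- def search(str, lst, size):
--     for i in range(len(lst) - 1, -1, -1):
--         if lst[i] == str:
--             return i
--     return -1
-- ===== Notes on version B (the rewrite author's own statement) =====
-- stated objective: idiomatic
-- what changed: Replaced A's forward fused accumulator loop (result plus a pos counter that only advances on mismatches) by the standard backward scan that returns the index of the last occurrence directly.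
-- intended difference: On lists where str occurs at least twice, A returns the last occurrence's index minus the number of earlier occurrences (its pos counter is only incremented on mismatches, an evident bug), while B returns the actual index of the last occurrence, the intended result of a last-match search. — e.g. on search("a", (["a", "a"], 0)): A returns 0, B returns 1
import Mathlib
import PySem

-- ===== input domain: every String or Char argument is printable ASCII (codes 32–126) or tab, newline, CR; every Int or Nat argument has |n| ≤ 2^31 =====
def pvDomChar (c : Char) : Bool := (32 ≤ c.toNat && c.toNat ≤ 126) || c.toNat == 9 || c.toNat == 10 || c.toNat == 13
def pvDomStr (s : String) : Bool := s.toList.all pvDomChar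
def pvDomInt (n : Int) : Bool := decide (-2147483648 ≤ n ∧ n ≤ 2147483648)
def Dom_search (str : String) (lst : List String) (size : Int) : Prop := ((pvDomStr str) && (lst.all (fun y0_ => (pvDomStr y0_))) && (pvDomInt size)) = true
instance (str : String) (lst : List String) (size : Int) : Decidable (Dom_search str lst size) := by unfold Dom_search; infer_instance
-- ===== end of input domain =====

-- B is the standard backward last-index search; A's value differs where str occurs twice or more (stated as an intended difference D_).


-- ===== PORT A =====
-- for s in lst: if s == str: result = pos else: pos += 1; fold state = (pos, result)
def search (str : String) (lst : List String) (size : Int) : Int :=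
  (lst.foldl (fun st s => if s == str then (st.1, st.1) else (st.1 + 1, st.2))
    ((0 : Int), (-1 : Int))).2

-- ===== PORT B =====
-- for i in range(len(lst)-1, -1, -1): if lst[i] == str: return i; return -1
-- counted down by structural recursion on the remaining range length (i = n-1 at state n)
def searchAltGo (str : String) (lst : List String) : Nat → Int
  | 0 => -1
  | n + 1 =>
    if PySem.List.pyGet? lst (n : Int) = some str then (n : Int)
    else searchAltGo str lst n

def search_alt (str : String) (lst : List String) (size : Int) : Int :=
  searchAltGo str lst lst.length

-- ===== PRECONDITION & SPEC =====
-- On lists where str occurs at least twice, A returns the last occurrence's index minus the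
-- number of earlier occurrences (its pos counter only advances on mismatches, an evident bug),
-- while B returns the actual index of the last occurrence, the intended last-index result.
def D_search (str : String) (lst : List String) (size : Int) : Prop := 2 ≤ lst.count str

instance (str : String) (lst : List String) (size : Int) : Decidable (D_search str lst size) := by
  unfold D_search; infer_instance

def Spec_search (str : String) (lst : List String) (size : Int) (out : Int) : Prop :=
  ¬ D_search str lst size → out = search_alt str lst size

instance (str : String) (lst : List String) (size : Int) (out : Int) : Decidable (Spec_search str lst size out) := by
  unfold Spec_search; infer_instance

def pvDiffWitness_search : String × List String × Int := ("a", (["a", "a"], 0))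
def pvDiffWitnessOut_search : Int × Int := (0, 1)

-- ===== CLAIM =====
def Claim_unchanged_search : Prop := ∀ (str : String) (lst : List String) (size : Int), Dom_search str lst size → Spec_search str lst size (search str lst size)
def Claim_changed_search : Prop := Dom_search (pvDiffWitness_search.1) (pvDiffWitness_search.2.1) (pvDiffWitness_search.2.2) ∧ D_search (pvDiffWitness_search.1) (pvDiffWitness_search.2.1) (pvDiffWitness_search.2.2) ∧ search (pvDiffWitness_search.1) (pvDiffWitness_search.2.1) (pvDiffWitness_search.2.2) = pvDiffWitnessOut_search.1 ∧ search_alt (pvDiffWitness_search.1) (pvDiffWitness_search.2.1) (pvDiffWitness_search.2.2) = pvDiffWitnessOut_search.2 ∧ pvDiffWitnessOut_search.1 ≠ pvDiffWitnessOut_search.2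
def Claim_exact_search : Prop := ∀ (str : String) (lst : List String) (size : Int), Dom_search str lst size → D_search str lst size → search str lst size ≠ search_alt str lst size

-- ===== LEMMAS AND PROOFS =====

-- the pos component of A's fold counts the mismatches seen so far
theorem search_fold_fst (str : String) (l : List String) (p r : Int) :
    (l.foldl (fun st s => if s == str then (st.1, st.1) else (st.1 + 1, st.2)) (p, r)).1
      = p + (l.countP (fun s => !(s == str)) : Int) := by
  induction l generalizing p r with
  | nil => simp
  | cons x t ih =>
    rw [List.foldl_cons, List.countP_cons]
    by_cases h : (x == str) = true
    · rw [if_pos h, ih]; simp [h]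
    · rw [if_neg h, ih]
      have hb : (x == str) = false := by simpa using h
      simp [hb]; ring

-- A on a snoc
theorem search_snoc (str : String) (t : List String) (x : String) (size : Int) :
    search str (t ++ [x]) size
      = if x == str then ((t.countP (fun s => !(s == str))) : Int) else search str t size := by
  unfold search
  rw [List.foldl_append, List.foldl_cons, List.foldl_nil]
  by_cases h : (x == str) = true
  · rw [if_pos h, if_pos h]
    simpa using search_fold_fst str t 0 (-1)
  · rw [if_neg h, if_neg h]

theorem searchAltGo_succ (str : String) (l : List String) (n : Nat) :
    searchAltGo str l (n + 1)
      = if PySem.List.pyGet? l (n : Int) = some str then (n : Int) else searchAltGo str l n := rfl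

-- B's loop ignores a snoc'd element while scanning indices below t.length
theorem searchAltGo_snoc (str : String) (t : List String) (x : String) (n : Nat)
    (hn : n ≤ t.length) : searchAltGo str (t ++ [x]) n = searchAltGo str t n := by
  induction n with
  | zero => rfl
  | succ m ih =>
    unfold searchAltGo
    have hm : m < t.length := hn
    have hget : PySem.List.pyGet? (t ++ [x]) (m : Int) = PySem.List.pyGet? t (m : Int) := by
      rw [PySem.List.pyGet?_natCast, PySem.List.pyGet?_natCast,
        List.getElem?_append_left hm]
    rw [hget, ih (Nat.le_of_lt hm)]

-- B on a snoc
theorem search_alt_snoc (str : String) (t : List String) (x : String) (size : Int) :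
    search_alt str (t ++ [x]) size
      = if x == str then (t.length : Int) else search_alt str t size := by
  unfold search_alt
  rw [List.length_append, List.length_singleton]
  have hget : PySem.List.pyGet? (t ++ [x]) ((t.length : Nat) : Int) = some x := by
    rw [PySem.List.pyGet?_natCast]
    simp
  rw [searchAltGo_succ, hget, searchAltGo_snoc str t x t.length (Nat.le_refl _)]
  by_cases h : x = str
  · subst h; simp
  · rw [if_neg (by simpa using h)]
    simp [h]

-- countP of mismatches + count of matches = length
theorem countP_mismatch (str : String) (t : List String) :
    t.countP (fun s => !(s == str)) + t.count str = t.length := by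
  induction t with
  | nil => rfl
  | cons a l ih =>
    rw [List.countP_cons, List.count_cons]
    by_cases h : (a == str) = true
    · simp [h]
      omega
    · simp [h]
      omega

theorem count_le_length (str : String) (t : List String) : t.count str ≤ t.length :=
  List.count_le_length

-- A = B when str occurs at most once
theorem search_eq_alt_of_count_le_one (str : String) (size : Int) (l : List String)
    (h : l.count str ≤ 1) : search str l size = search_alt str l size := by
  induction l using List.reverseRecOn with
  | nil => rfl
  | append_singleton t x ih =>
    rw [search_snoc, search_alt_snoc]
    have hsum : (t ++ [x]).count str = t.count str + ([x]).count str := List.count_append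
    by_cases hx : (x == str) = true
    · rw [if_pos hx, if_pos hx]
      have hxe : x = str := by simpa using hx
      have hx1 : ([x]).count str = 1 := by subst hxe; simp
      have hcm := countP_mismatch str t
      have hccount : t.count str = 0 := by omega
      have : t.countP (fun s => !(s == str)) = t.length := by omega
      rw [this]
    · rw [if_neg hx, if_neg hx]
      apply ih
      have hx0 : ([x]).count str = 0 := by
        simp only [List.count_singleton]
        simp only [Bool.not_eq_true] at hx ⊢
        simp [hx]
      omega

-- A ≠ B when str occurs at least twice
theorem search_ne_alt_of_two_le_count (str : String) (size : Int) (l : List String)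
    (h : 2 ≤ l.count str) : search str l size ≠ search_alt str l size := by
  induction l using List.reverseRecOn with
  | nil => simp at h
  | append_singleton t x ih =>
    rw [search_snoc, search_alt_snoc]
    have hsum : (t ++ [x]).count str = t.count str + ([x]).count str := List.count_append
    by_cases hx : (x == str) = true
    · rw [if_pos hx, if_pos hx]
      have hxe : x = str := by simpa using hx
      have hx1 : ([x]).count str = 1 := by subst hxe; simp
      have hcm := countP_mismatch str t
      have hct : 1 ≤ t.count str := by omega
      intro he
      have : t.countP (fun s => !(s == str)) = t.length := by exact_mod_cast he
      omega
    · rw [if_neg hx, if_neg hx]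
      apply ih
      have hx0 : ([x]).count str = 0 := by
        simp only [List.count_singleton]
        simp only [Bool.not_eq_true] at hx ⊢
        simp [hx]
      omega

-- ===== VERDICT =====
theorem search_spec : Claim_unchanged_search := by
  intro str lst size _
  unfold Spec_search D_search
  intro hnd
  exact search_eq_alt_of_count_le_one str size lst (by omega)

theorem search_changed : Claim_changed_search := by
  unfold Claim_changed_search; decide

theorem search_tight : Claim_exact_search := by
  intro str lst size _ hd
  exact search_ne_alt_of_two_le_count str size lst hd
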